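-- pv_equiv track=rewrite | github.com/8pxl/veritas | backend/test/av_recognition.py | _compress_transcript_for_speakers
-- ===== SOURCE A (Python) =====
-- def _compress_transcript_for_speakers(
--     transcript: str, max_lines: int = 400, head_lines: int = 120
-- ) -> str:
--     lines = [line.strip() for line in transcript.splitlines() if line.strip()]
--     if len(lines) <= max_lines:
--         return transcript
--
--     cue_keywords = (
--         "my name is",
--         "i'm",
--         "i am",
--         "introduce",
--         "welcome",
--         "please welcome",
--         "joining me",
--         "next speaker",
--         "hand over",
--         "cto",
--         "cfo",
--         "ceo",
--         "president",
--         "vp",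
--         "svp",
--         "chief",
--     )
--
--     selected = set(range(min(head_lines, len(lines))))
--     selected.update(range(max(0, len(lines) - 40), len(lines)))
--
--     for i, line in enumerate(lines):
--         line_lower = line.lower()
--         if any(k in line_lower for k in cue_keywords):
--             selected.add(i)
--         if i % 5 == 0:
--             selected.add(i)
--
--     picked_idx = sorted(selected)[:max_lines]
--     return "\n".join(lines[i] for i in picked_idx)
-- ===== SOURCE B (Python) =====
-- def _compress_transcript_for_speakers(
--     transcript: str, max_lines: int = 400, head_lines: int = 120
-- ) -> str:
--     lines = [line.strip() for line in transcript.splitlines() if line.strip()]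
--     n = len(lines)
--     if n <= max_lines:
--         return transcript
--
--     cue_keywords = (
--         "my name is",
--         "i'm",
--         "i am",
--         "introduce",
--         "welcome",
--         "please welcome",
--         "joining me",
--         "next speaker",
--         "hand over",
--         "cto",
--         "cfo",
--         "ceo",
--         "president",
--         "vp",
--         "svp",
--         "chief",
--     )
--
--     # Segment decomposition: the head and tail windows are taken wholesale by
--     # slicing; only the middle segment is scanned, keeping every 5th line or a
--     # line containing a speaker cue.
--     lo = min(max(head_lines, 0), n)   # head window is exactly lines[:lo]
--     hi = max(n - 40, 0)               # tail window is exactly lines[hi:]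
--     if lo >= hi:
--         kept = lines
--     else:
--         middle = [
--             line
--             for i, line in enumerate(lines[lo:hi], lo)
--             if i % 5 == 0 or any(k in line.lower() for k in cue_keywords)
--         ]
--         kept = lines[:lo] + middle + lines[hi:]
--     return "\n".join(kept[:max_lines])
-- ===== Notes on version B (the rewrite author's own statement) =====
-- stated objective: alternative
-- what changed: Replaces A's global index-set construction (ranges added to a set, a per-line marking loop over all lines, sort, truncate, per-index lookups) by a segment decomposition: the head and tail windows are taken directly as list slices and only the middle segment is scanned for the every-5th/keyword cues, then the three segments are concatenated, truncated and joined - no set, no sort and no index lookups.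
import Mathlib
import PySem

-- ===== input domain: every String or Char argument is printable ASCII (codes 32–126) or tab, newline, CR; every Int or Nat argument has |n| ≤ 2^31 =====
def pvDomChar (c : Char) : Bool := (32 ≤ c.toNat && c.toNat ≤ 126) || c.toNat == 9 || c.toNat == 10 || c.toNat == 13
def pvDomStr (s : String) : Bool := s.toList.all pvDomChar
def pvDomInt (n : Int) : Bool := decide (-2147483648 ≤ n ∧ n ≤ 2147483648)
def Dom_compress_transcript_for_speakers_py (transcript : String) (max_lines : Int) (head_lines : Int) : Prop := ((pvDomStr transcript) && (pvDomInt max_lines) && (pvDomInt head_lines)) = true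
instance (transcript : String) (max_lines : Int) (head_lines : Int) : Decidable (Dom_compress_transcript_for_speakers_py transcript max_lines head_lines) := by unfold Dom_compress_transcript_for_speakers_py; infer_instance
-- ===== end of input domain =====

-- B replaces A's index-set/sort selection by a segment decomposition: head and tail windows are
-- taken wholesale as slices, only the middle segment is scanned for cues (objective: alternative).

-- shared helpers (both Pythons contain the identical first line and keyword tuple)
def pvCues : List String :=
  ["my name is", "i'm", "i am", "introduce", "welcome", "please welcome", "joining me",
   "next speaker", "hand over", "cto", "cfo", "ceo", "president", "vp", "svp", "chief"]

def pvCue (line : String) : Bool :=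
  pvCues.any (fun k => PySem.Str.isIn k (PySem.Str.lower line))

def pvLines (transcript : String) : List String :=
  (PySem.Str.splitlines transcript).filterMap
    (fun l => if PySem.Str.strip l = "" then none else some (PySem.Str.strip l))

-- ===== PORT A =====
def compress_transcript_for_speakers_py (transcript : String) (max_lines : Int) (head_lines : Int) : String :=
  let lines := pvLines transcript
  if (lines.length : Int) ≤ max_lines then transcript
  else
    let selected : PySem.Set Int :=
      PySem.Set.ofList (PySem.List.pyRange 0 (min head_lines (lines.length : Int)) 1)
    let selected :=
      PySem.Set.update selected
        (PySem.List.pyRange (max 0 ((lines.length : Int) - 40)) (lines.length : Int) 1)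
    let selected :=
      (PySem.List.enumerate lines 0).foldl
        (fun s p =>
          let s := if pvCue p.2 then PySem.Set.add s p.1 else s
          if PySem.Int.mod p.1 5 == 0 then PySem.Set.add s p.1 else s)
        selected
    let picked_idx :=
      PySem.List.slice (PySem.List.sorted selected (fun x => x) false) none (some max_lines)
    -- lines[i]: every i ∈ selected satisfies 0 ≤ i < len(lines), so the default is never used
    PySem.Str.join "\n" (picked_idx.map (fun i => PySem.List.pyGetD lines i ""))

-- ===== PORT B =====
def compress_transcript_for_speakers_py_alt (transcript : String) (max_lines : Int) (head_lines : Int) : String :=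
  let lines := pvLines transcript
  let n : Int := (lines.length : Int)
  if n ≤ max_lines then transcript
  else
    let lo := min (max head_lines 0) n       -- head window is exactly lines[:lo]
    let hi := max (n - 40) 0                 -- tail window is exactly lines[hi:]
    let kept :=
      if hi ≤ lo then lines
      else
        let middle :=
          ((PySem.List.enumerate (PySem.List.slice lines (some lo) (some hi)) lo).filter
            (fun p => PySem.Int.mod p.1 5 == 0 || pvCue p.2)).map (fun p => p.2)
        PySem.List.slice lines none (some lo) ++ middle ++ PySem.List.slice lines (some hi) none
    PySem.Str.join "\n" (PySem.List.slice kept none (some max_lines))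

-- ===== PRECONDITION & SPEC =====
def Spec_compress_transcript_for_speakers_py (transcript : String) (max_lines : Int) (head_lines : Int) (out : String) : Prop := out = compress_transcript_for_speakers_py_alt transcript max_lines head_lines
instance (transcript : String) (max_lines : Int) (head_lines : Int) (out : String) : Decidable (Spec_compress_transcript_for_speakers_py transcript max_lines head_lines out) := by unfold Spec_compress_transcript_for_speakers_py; infer_instance

-- ===== CLAIM =====
def Claim_equal_compress_transcript_for_speakers_py : Prop := ∀ (transcript : String) (max_lines : Int) (head_lines : Int), Dom_compress_transcript_for_speakers_py transcript max_lines head_lines → Spec_compress_transcript_for_speakers_py transcript max_lines head_lines (compress_transcript_for_speakers_py transcript max_lines head_lines)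

-- ===== LEMMAS AND PROOFS =====

-- the single keep-condition A's selected set denotes, used only by the proof
def pvKeep (n head_lines : Int) (i : Int) (line : String) : Bool :=
  if decide (i < head_lines) || decide (n - 40 ≤ i) || (PySem.Int.mod i 5 == 0) then true
  else pvCue line

-- A's loop step, named so the fold lemmas below can speak about it
def pvStep (s : PySem.Set Int) (p : Int × String) : PySem.Set Int :=
  let s := if pvCue p.2 then PySem.Set.add s p.1 else s
  if PySem.Int.mod p.1 5 == 0 then PySem.Set.add s p.1 else s

lemma pvMem_step (s : PySem.Set Int) (q : Int × String) (y : Int) :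
    y ∈ pvStep s q ↔ y ∈ s ∨ ((pvCue q.2 || (PySem.Int.mod q.1 5 == 0)) = true ∧ y = q.1) := by
  unfold pvStep
  cases hc : pvCue q.2 <;> cases hm : (PySem.Int.mod q.1 5 == 0) <;>
    simp [PySem.Set.mem_add]

lemma pvMem_foldl_step (l : List (Int × String)) (s : PySem.Set Int) (y : Int) :
    y ∈ l.foldl pvStep s ↔
      y ∈ s ∨ ∃ p ∈ l, (pvCue p.2 || (PySem.Int.mod p.1 5 == 0)) = true ∧ y = p.1 := by
  induction l generalizing s with
  | nil => simp
  | cons q t ih =>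
      rw [List.foldl_cons, ih]
      simp only [pvMem_step, List.exists_mem_cons_iff]
      rw [or_assoc]

lemma pvNodup_foldl_step (l : List (Int × String)) (s : PySem.Set Int) (hs : s.Nodup) :
    (l.foldl pvStep s).Nodup := by
  induction l generalizing s with
  | nil => exact hs
  | cons q t ih =>
      apply ih
      simp only [pvStep]
      split <;> split <;> first
        | exact hs
        | exact PySem.Set.nodup_add _ _ hs
        | exact PySem.Set.nodup_add _ _ (PySem.Set.nodup_add _ _ hs)

-- slicing xs[:b] commutes with map (the two ports truncate on opposite sides of the index→line map)
lemma pvSlice_to_map {α β : Type} (f : α → β) (xs : List α) (b : Int) :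
    PySem.List.slice (xs.map f) none (some b) = (PySem.List.slice xs none (some b)).map f := by
  simp [PySem.List.slice, PySem.List.clampIdx, List.map_take]

lemma pvKeep_iff (n h i : Int) (line : String) :
    pvKeep n h i line = true ↔
      (i < h ∨ n - 40 ≤ i ∨ (PySem.Int.mod i 5 == 0) = true ∨ pvCue line = true) := by
  unfold pvKeep
  split <;> rename_i hg <;> simp_all
  · tauto
  · constructor
    · exact fun h => Or.inr (Or.inr h)
    · rintro (h | h | h)
      · omega
      · omega
      · exact h

-- the heart of the old A-side analysis: A's sorted index set is the keep-filtered index list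
lemma pvSorted_selected (lines : List String) (head_lines : Int) :
    PySem.List.sorted
      ((PySem.List.enumerate lines 0).foldl pvStep
        (PySem.Set.update
          (PySem.Set.ofList (PySem.List.pyRange 0 (min head_lines (lines.length : Int)) 1))
          (PySem.List.pyRange (max 0 ((lines.length : Int) - 40)) (lines.length : Int) 1)))
      (fun x => x) false
    = ((PySem.List.enumerate lines 0).filter
        (fun p => pvKeep (lines.length : Int) head_lines p.1 p.2)).map (fun p => p.1) := by
  set n : Int := (lines.length : Int) with hn
  set E := PySem.List.enumerate lines 0 with hE
  set F := E.filter (fun p => pvKeep n head_lines p.1 p.2) with hF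
  have hpairE : E.Pairwise (fun p q => p.1 < q.1) := PySem.List.pairwise_lt_enumerate lines 0
  have hpair : (F.map (fun p => p.1)).Pairwise (· < ·) := by
    rw [List.pairwise_map]
    exact hpairE.filter _
  have hnd1 : (F.map (fun p => p.1)).Nodup := hpair.imp (fun h => ne_of_lt h)
  have hnd2 : ((PySem.List.enumerate lines 0).foldl pvStep
      (PySem.Set.update
        (PySem.Set.ofList (PySem.List.pyRange 0 (min head_lines n) 1))
        (PySem.List.pyRange (max 0 (n - 40)) n 1))).Nodup := by
    apply pvNodup_foldl_step
    exact PySem.Set.nodup_update _ _ (PySem.Set.nodup_ofList _)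
  have hmem : ∀ x : Int, x ∈ F.map (fun p => p.1) ↔
      x ∈ (PySem.List.enumerate lines 0).foldl pvStep
        (PySem.Set.update
          (PySem.Set.ofList (PySem.List.pyRange 0 (min head_lines n) 1))
          (PySem.List.pyRange (max 0 (n - 40)) n 1)) := by
    intro x
    rw [pvMem_foldl_step]
    rw [PySem.Set.mem_update, PySem.Set.mem_ofList, PySem.List.mem_pyRange_one,
      PySem.List.mem_pyRange_one]
    constructor
    · rintro hx
      rcases List.mem_map.mp hx with ⟨p, hpF, rfl⟩
      have hpE : p ∈ E := List.mem_of_mem_filter hpF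
      have hkeep : pvKeep n head_lines p.1 p.2 = true := (List.mem_filter.mp hpF).2
      rcases (PySem.List.mem_enumerate_iff _ _ _).mp hpE with ⟨k, hk, rfl⟩
      simp only [zero_add] at *
      have hk0 : (0 : Int) ≤ (k : Int) := by positivity
      have hkn : (k : Int) < n := by rw [hn]; exact_mod_cast hk
      rcases (pvKeep_iff n head_lines (k : Int) lines[k]).mp hkeep with h | h | h | h
      · exact Or.inl (Or.inl ⟨hk0, lt_min h hkn⟩)
      · exact Or.inl (Or.inr ⟨max_le hk0 h, hkn⟩)
      · refine Or.inr ⟨((k : Int), lines[k]), ?_, by simp only [Bool.or_eq_true]; exact Or.inr h, rfl⟩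
        exact (PySem.List.mem_enumerate_iff _ _ _).mpr ⟨k, hk, by simp⟩
      · refine Or.inr ⟨((k : Int), lines[k]), ?_, by simp only [Bool.or_eq_true]; exact Or.inl h, rfl⟩
        exact (PySem.List.mem_enumerate_iff _ _ _).mpr ⟨k, hk, by simp⟩
    · rintro ((⟨h0, hlt⟩ | ⟨hge, hlt⟩) | ⟨p, hpE, hcond, rfl⟩)
      · -- head range
        have h0n : 0 ≤ x ∧ x < n := ⟨h0, lt_of_lt_of_le hlt (min_le_right _ _)⟩
        have hk : x.toNat < lines.length := by omega
        refine List.mem_map.mpr ⟨((x.toNat : Int), lines[x.toNat]), ?_, by omega⟩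
        rw [hF]
        refine List.mem_filter.mpr ⟨?_, ?_⟩
        · exact (PySem.List.mem_enumerate_iff _ _ _).mpr ⟨x.toNat, hk, by simp⟩
        · exact (pvKeep_iff _ _ _ _).mpr (Or.inl (by omega))
      · -- tail range
        have h0 : 0 ≤ x := le_trans (le_max_left _ _) hge
        have hk : x.toNat < lines.length := by omega
        refine List.mem_map.mpr ⟨((x.toNat : Int), lines[x.toNat]), ?_, by omega⟩
        rw [hF]
        refine List.mem_filter.mpr ⟨?_, ?_⟩
        · exact (PySem.List.mem_enumerate_iff _ _ _).mpr ⟨x.toNat, hk, by simp⟩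
        · refine (pvKeep_iff _ _ _ _).mpr (Or.inr (Or.inl ?_))
          have := le_max_right (0 : Int) (n - 40)
          omega
      · -- cue / every-5th
        refine List.mem_map.mpr ⟨p, ?_, rfl⟩
        rw [hF]
        refine List.mem_filter.mpr ⟨hpE, ?_⟩
        rcases Bool.or_eq_true_iff.mp hcond with h | h
        · exact (pvKeep_iff _ _ _ _).mpr (Or.inr (Or.inr (Or.inr h)))
        · exact (pvKeep_iff _ _ _ _).mpr (Or.inr (Or.inr (Or.inl h)))
  refine PySem.List.sorted_eq_of_perm_of_pairwise_lt _ _ _ ?_ hpair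
  exact (List.perm_ext_iff_of_nodup hnd1 hnd2).mpr hmem

-- B's segment decomposition builds exactly the keep-filtered line list
lemma pvKept_eq_filter (lines : List String) (head_lines : Int) :
    (if max ((lines.length : Int) - 40) 0 ≤ min (max head_lines 0) (lines.length : Int) then lines
     else
       PySem.List.slice lines none (some (min (max head_lines 0) (lines.length : Int))) ++
       ((PySem.List.enumerate
           (PySem.List.slice lines (some (min (max head_lines 0) (lines.length : Int)))
             (some (max ((lines.length : Int) - 40) 0)))
           (min (max head_lines 0) (lines.length : Int))).filter
         (fun p => PySem.Int.mod p.1 5 == 0 || pvCue p.2)).map (fun p => p.2) ++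
       PySem.List.slice lines (some (max ((lines.length : Int) - 40) 0)) none)
    = ((PySem.List.enumerate lines 0).filter
        (fun p => pvKeep (lines.length : Int) head_lines p.1 p.2)).map (fun p => p.2) := by
  set n : Int := (lines.length : Int) with hn
  set lo : Int := min (max head_lines 0) n with hlo
  set hi : Int := max (n - 40) 0 with hhi
  have hn0 : 0 ≤ n := by positivity
  have hlo0 : 0 ≤ lo := by omega
  have hhi0 : 0 ≤ hi := by omega
  have hlon : lo ≤ n := by omega
  have hhin : hi ≤ n := by omega
  have hloN : (lo.toNat : Int) = lo := Int.toNat_of_nonneg hlo0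
  have hhiN : (hi.toNat : Int) = hi := Int.toNat_of_nonneg hhi0
  have hloL : lo.toNat ≤ lines.length := by omega
  have hhiL : hi.toNat ≤ lines.length := by omega
  by_cases hcase : hi ≤ lo
  · rw [if_pos hcase]
    have hfull : (PySem.List.enumerate lines 0).filter
        (fun p => pvKeep n head_lines p.1 p.2) = PySem.List.enumerate lines 0 := by
      apply List.filter_eq_self.mpr
      intro p hp
      rcases (PySem.List.mem_enumerate_iff _ _ _).mp hp with ⟨k, hk, rfl⟩
      have hkn : (k : Int) < n := by rw [hn]; exact_mod_cast hk
      have hk0 : (0 : Int) ≤ (k : Int) := by positivity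
      refine (pvKeep_iff _ _ _ _).mpr ?_
      by_cases h1 : (0 : Int) + (k : Int) < lo
      · exact Or.inl (by omega)
      · exact Or.inr (Or.inl (by omega))
    rw [hfull, PySem.List.map_snd_enumerate]
  · rw [if_neg hcase]
    have hlt : lo < hi := by omega
    set A := lines.take lo.toNat with hA
    set C := lines.drop hi.toNat with hC
    set M := (lines.drop lo.toNat).take (hi.toNat - lo.toNat) with hM
    have hAlen : A.length = lo.toNat := by
      rw [hA, List.length_take]; omega
    have hMlen : M.length = hi.toNat - lo.toNat := by
      rw [hM, List.length_take, List.length_drop]; omega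
    have hMC : M ++ C = lines.drop lo.toNat := by
      have hdd : lines.drop hi.toNat = (lines.drop lo.toNat).drop (hi.toNat - lo.toNat) := by
        rw [List.drop_drop]; congr 1; omega
      rw [hM, hC, hdd, List.take_append_drop]
    have hsplit : lines = A ++ M ++ C := by
      rw [List.append_assoc, hMC, hA, List.take_append_drop]
    have hsl1 : PySem.List.slice lines none (some lo) = A := by
      rw [PySem.List.slice_to _ hlo0, hA]
    have hsl2 : PySem.List.slice lines (some hi) none = C := by
      rw [PySem.List.slice_from _ hhi0, hC]
    have hsl3 : PySem.List.slice lines (some lo) (some hi) = M := by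
      rw [PySem.List.slice_toNat _ hlo0 hhi0, hM]
    rw [hsl1, hsl2, hsl3]
    conv_rhs => rw [hsplit]
    rw [PySem.List.enumerate_append, PySem.List.enumerate_append,
      List.filter_append, List.filter_append, List.map_append, List.map_append]
    have hfA : (PySem.List.enumerate A 0).filter
        (fun p => pvKeep n head_lines p.1 p.2) = PySem.List.enumerate A 0 := by
      apply List.filter_eq_self.mpr
      intro p hp
      rcases (PySem.List.mem_enumerate_iff _ _ _).mp hp with ⟨k, hk, rfl⟩
      rw [hAlen] at hk
      have hkl : (k : Int) < lo := by omega
      exact (pvKeep_iff _ _ _ _).mpr (Or.inl (by omega))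
    have hfC : (PySem.List.enumerate C ((0 : Int) + ((A ++ M).length : Int))).filter
        (fun p => pvKeep n head_lines p.1 p.2)
        = PySem.List.enumerate C ((0 : Int) + ((A ++ M).length : Int)) := by
      apply List.filter_eq_self.mpr
      intro p hp
      rcases (PySem.List.mem_enumerate_iff _ _ _).mp hp with ⟨k, hk, rfl⟩
      refine (pvKeep_iff _ _ _ _).mpr (Or.inr (Or.inl ?_))
      have hk0 : (0 : Int) ≤ (k : Int) := by positivity
      rw [List.length_append, hAlen, hMlen]
      push_cast
      omega
    have hfM : (PySem.List.enumerate M ((0 : Int) + A.length)).filter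
        (fun p => pvKeep n head_lines p.1 p.2)
        = (PySem.List.enumerate M lo).filter
            (fun p => PySem.Int.mod p.1 5 == 0 || pvCue p.2) := by
      have hstart : (0 : Int) + A.length = lo := by rw [hAlen]; omega
      rw [hstart]
      apply List.filter_congr
      intro p hp
      rcases (PySem.List.mem_enumerate_iff _ _ _).mp hp with ⟨k, hk, rfl⟩
      rw [hMlen] at hk
      have h1 : ¬ (lo + (k : Int) < head_lines) := by omega
      have h2 : ¬ (n - 40 ≤ lo + (k : Int)) := by omega
      show pvKeep n head_lines (lo + (k : Int)) M[k] = _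
      unfold pvKeep
      cases hm : (PySem.Int.mod (lo + (k : Int)) 5 == 0) <;> simp [h1, h2]
    rw [hfA, hfC, hfM, PySem.List.map_snd_enumerate, PySem.List.map_snd_enumerate]

-- ===== VERDICT =====
theorem compress_transcript_for_speakers_py_spec : Claim_equal_compress_transcript_for_speakers_py := by
  intro transcript max_lines head_lines _hdom
  unfold Spec_compress_transcript_for_speakers_py
  unfold compress_transcript_for_speakers_py compress_transcript_for_speakers_py_alt
  set lines := pvLines transcript with hlines
  by_cases hmx : (lines.length : Int) ≤ max_lines
  · simp [hmx]
  · rw [if_neg hmx, if_neg hmx]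
    show PySem.Str.join "\n"
        ((PySem.List.slice
          (PySem.List.sorted
            ((PySem.List.enumerate lines 0).foldl pvStep
              (PySem.Set.update
                (PySem.Set.ofList (PySem.List.pyRange 0 (min head_lines (lines.length : Int)) 1))
                (PySem.List.pyRange (max 0 ((lines.length : Int) - 40)) (lines.length : Int) 1)))
            (fun x => x) false)
          none (some max_lines)).map (fun i => PySem.List.pyGetD lines i ""))
      = PySem.Str.join "\n"
        (PySem.List.slice
          (if max ((lines.length : Int) - 40) 0 ≤ min (max head_lines 0) (lines.length : Int) then lines
           else
             PySem.List.slice lines none (some (min (max head_lines 0) (lines.length : Int))) ++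
             ((PySem.List.enumerate
                 (PySem.List.slice lines (some (min (max head_lines 0) (lines.length : Int)))
                   (some (max ((lines.length : Int) - 40) 0)))
                 (min (max head_lines 0) (lines.length : Int))).filter
               (fun p => PySem.Int.mod p.1 5 == 0 || pvCue p.2)).map (fun p => p.2) ++
             PySem.List.slice lines (some (max ((lines.length : Int) - 40) 0)) none)
          none (some max_lines))
    rw [pvKept_eq_filter lines head_lines, pvSorted_selected lines head_lines]
    set F := (PySem.List.enumerate lines 0).filter
      (fun p => pvKeep (lines.length : Int) head_lines p.1 p.2) with hF
    rw [← pvSlice_to_map (fun i => PySem.List.pyGetD lines i "") (F.map (fun p => p.1)) max_lines]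
    congr 1
    rw [List.map_map]
    congr 1
    apply List.map_congr_left
    intro p hp
    have hpE : p ∈ PySem.List.enumerate lines 0 := List.mem_of_mem_filter hp
    rcases (PySem.List.mem_enumerate_iff _ _ _).mp hpE with ⟨k, hk, rfl⟩
    simp [hk]
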